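-- pv_equiv track=rewrite | github.com/janezd/advent-of-code | 17 No Such Thing as Too Much/solution.py | choose2
-- ===== SOURCE A (Python) =====
-- def choose2(n, available):
--     if not n:
--         return [[]]
--     ways = []
--     for i, next in enumerate(available):
--         if next <= n:
--             subways = choose2(n - next, available[i + 1:])
--             ways += [[next] + x for x in subways]
--     return ways
-- ===== SOURCE B (Python) =====
-- def choose2(n, available):
--     # include/exclude recursion on the first element instead of a loop over start indices
--     if not n:
--         return [[]]
--     if not available:
--         return []
--     head, tail = available[0], available[1:]
--     with_head = [[head] + x for x in choose2(n - head, tail)] if head <= n else []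
--     return with_head + choose2(n, tail)
-- ===== Notes on version B (the rewrite author's own statement) =====
-- stated objective: alternative
-- what changed: Replaces the loop over all start indices (with list slicing per index) by an include/exclude binary recursion on the first element.
import Mathlib
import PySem

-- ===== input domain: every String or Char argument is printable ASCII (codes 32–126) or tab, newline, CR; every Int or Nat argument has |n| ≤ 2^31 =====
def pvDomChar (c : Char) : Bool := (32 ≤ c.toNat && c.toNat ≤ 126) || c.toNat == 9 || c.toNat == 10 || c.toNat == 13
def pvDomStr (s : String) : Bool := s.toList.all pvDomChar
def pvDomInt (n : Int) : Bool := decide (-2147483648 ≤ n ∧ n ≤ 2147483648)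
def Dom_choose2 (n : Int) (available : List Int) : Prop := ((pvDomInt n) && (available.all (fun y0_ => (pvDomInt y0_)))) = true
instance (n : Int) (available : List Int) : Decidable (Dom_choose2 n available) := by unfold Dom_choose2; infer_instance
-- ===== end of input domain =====

-- B replaces A's loop over all start indices by an include/exclude recursion on the head; objective: alternative decomposition.


-- ===== PORT A =====
-- A's loop 'for i, next in enumerate(available)' with slice 'available[i+1:]' is ported as
-- structural recursion over successive suffixes: when the loop is at element `next`, the
-- remaining suffix `rest` is exactly available[i+1:] (i ≥ 0 is always in range, so the
-- slice is exactly the drop). `ways` is the same accumulator, extended in the same order.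
mutual
def choose2 (n : Int) (available : List Int) : List (List Int) :=
  if n = 0 then [[]]
  else choose2Loop n available []
termination_by 2 * available.length + 1

def choose2Loop (n : Int) : List Int → List (List Int) → List (List Int)
  | [], ways => ways
  | next :: rest, ways =>
    if next ≤ n then
      choose2Loop n rest (ways ++ (choose2 (n - next) rest).map (fun x => next :: x))
    else
      choose2Loop n rest ways
termination_by l _ => 2 * l.length
end

-- ===== PORT B =====
def choose2_alt (n : Int) (available : List Int) : List (List Int) :=
  if n = 0 then [[]]
  else
    match available with
    | [] => []
    | head :: tail =>
      (if head ≤ n then (choose2_alt (n - head) tail).map (fun x => head :: x) else [])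
        ++ choose2_alt n tail

-- ===== PRECONDITION & SPEC =====
def Spec_choose2 (n : Int) (available : List Int) (out : List (List Int)) : Prop := out = choose2_alt n available
instance (n : Int) (available : List Int) (out : List (List Int)) : Decidable (Spec_choose2 n available out) := by unfold Spec_choose2; infer_instance

-- ===== CLAIM (what is proved, stated in full; the proofs are below) =====
def Claim_equal_choose2 : Prop := ∀ (n : Int) (available : List Int), Dom_choose2 n available → Spec_choose2 n available (choose2 n available)

-- ===== LEMMAS AND PROOFS =====

theorem choose2Loop_eq (l : List Int)
    (H : ∀ (l' : List Int), l'.length < l.length → ∀ m, choose2 m l' = choose2_alt m l')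
    (m : Int) (ways : List (List Int)) (hm : m ≠ 0) :
    choose2Loop m l ways = ways ++ choose2_alt m l := by
  induction l generalizing ways with
  | nil => simp [choose2Loop, choose2_alt, hm]
  | cons h2 t2 ih2 =>
    have H' : ∀ (l' : List Int), l'.length < t2.length → ∀ m, choose2 m l' = choose2_alt m l' := by
      intro l' hl' m'
      exact H l' (Nat.lt_trans hl' (by simp)) m'
    have rec_eq : choose2 (m - h2) t2 = choose2_alt (m - h2) t2 :=
      H t2 (by simp) (m - h2)
    by_cases hle : h2 ≤ m
    · rw [choose2Loop, if_pos hle, ih2 H', choose2_alt]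
      simp [hm, hle, rec_eq]
    · rw [choose2Loop, if_neg hle, ih2 H', choose2_alt]
      simp [hm, hle]

theorem choose2_eq_alt : ∀ (available : List Int) (n : Int), choose2 n available = choose2_alt n available := by
  have main : ∀ (k : Nat) (l : List Int), l.length ≤ k → ∀ n, choose2 n l = choose2_alt n l := by
    intro k
    induction k with
    | zero =>
      intro l hl n
      have hnil : l = [] := List.length_eq_zero_iff.mp (Nat.le_zero.mp hl)
      subst hnil
      by_cases hn : n = 0 <;> simp [choose2, choose2Loop, choose2_alt, hn]
    | succ k ihk =>
      intro l hl n
      have H : ∀ (l' : List Int), l'.length < l.length → ∀ m, choose2 m l' = choose2_alt m l' := by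
        intro l' hl' m
        exact ihk l' (by omega) m
      by_cases hn : n = 0
      · cases l <;> simp [choose2, choose2_alt, hn]
      · rw [choose2, if_neg hn, choose2Loop_eq l H n [] hn]
        simp
  exact fun available n => main available.length available le_rfl n

-- ===== VERDICT (by name: the statement is the Claim_ definition above) =====
theorem choose2_spec : Claim_equal_choose2 := by
  intro n available _
  exact choose2_eq_alt available n
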